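-- pv_equiv track=rewrite | github.com/arjun-christopher/Resume-Analysis-Agent | app/extractors/skills_extractor.py | extract_level_from_text
-- ===== SOURCE A (Python) =====
-- def extract_level_from_text(text: str) -> str:
--     """Extract skill level from text"""
--     text_lower = text.lower()
--
--     if any(word in text_lower for word in ['expert', 'master', 'guru', 'architect', 'lead']):
--         return 'expert'
--     elif any(word in text_lower for word in ['advanced', 'senior', 'experienced', 'professional']):
--         return 'advanced'
--     elif any(word in text_lower for word in ['intermediate', 'moderate', 'competent', 'proficient']):
--         return 'intermediate'
--     elif any(word in text_lower for word in ['beginner', 'basic', 'novice', 'elementary']):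
--         return 'beginner'
--     elif any(word in text_lower for word in ['native', 'fluent']):
--         return 'expert'
--     elif any(word in text_lower for word in ['conversational', 'working']):
--         return 'intermediate'
--
--     return 'intermediate'
-- ===== SOURCE B (Python) =====
-- # Priority-table reimplementation: collect ranks of all matched keywords, pick the best.
-- _LEVEL_TABLE = [
--     ("expert", 0), ("master", 0), ("guru", 0), ("architect", 0), ("lead", 0),
--     ("advanced", 1), ("senior", 1), ("experienced", 1), ("professional", 1),
--     ("intermediate", 2), ("moderate", 2), ("competent", 2), ("proficient", 2),
--     ("beginner", 3), ("basic", 3), ("novice", 3), ("elementary", 3),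
--     ("native", 4), ("fluent", 4),
--     ("conversational", 5), ("working", 5),
-- ]
-- _LEVEL_NAMES = ["expert", "advanced", "intermediate", "beginner", "expert", "intermediate"]
--
-- def extract_level_from_text(text: str) -> str:
--     text_lower = text.lower()
--     ranks = [rank for word, rank in _LEVEL_TABLE if word in text_lower]
--     return _LEVEL_NAMES[min(ranks)] if ranks else "intermediate"
-- ===== Notes on version B (the rewrite author's own statement) =====
-- stated objective: alternative
-- what changed: Replaced the six-way short-circuit if/elif cascade by a single ordered keyword->rank table scanned once, collecting the ranks of all matched keywords and mapping the minimum rank back to its level name (default 'intermediate').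
import Mathlib
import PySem

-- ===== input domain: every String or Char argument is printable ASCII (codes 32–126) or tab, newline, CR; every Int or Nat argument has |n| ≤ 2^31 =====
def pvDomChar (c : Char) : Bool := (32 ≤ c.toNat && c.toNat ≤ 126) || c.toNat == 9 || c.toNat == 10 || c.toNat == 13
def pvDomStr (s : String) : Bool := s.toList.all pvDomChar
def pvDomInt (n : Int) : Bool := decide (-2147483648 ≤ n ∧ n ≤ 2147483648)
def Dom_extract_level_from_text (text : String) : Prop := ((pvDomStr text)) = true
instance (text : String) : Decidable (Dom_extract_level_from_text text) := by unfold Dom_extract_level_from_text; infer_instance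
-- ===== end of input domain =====

-- B replaces A's six-way if/elif cascade by one ordered keyword→rank table: collect the ranks of all
-- matched keywords and map the minimum rank back to its level name (objective: alternative decomposition).

-- ===== PORT A =====
def extract_level_from_text (text : String) : String :=
  let text_lower := PySem.Str.lower text
  if ["expert", "master", "guru", "architect", "lead"].any (fun w => PySem.Str.isIn w text_lower) then "expert"
  else if ["advanced", "senior", "experienced", "professional"].any (fun w => PySem.Str.isIn w text_lower) then "advanced"
  else if ["intermediate", "moderate", "competent", "proficient"].any (fun w => PySem.Str.isIn w text_lower) then "intermediate"
  else if ["beginner", "basic", "novice", "elementary"].any (fun w => PySem.Str.isIn w text_lower) then "beginner"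
  else if ["native", "fluent"].any (fun w => PySem.Str.isIn w text_lower) then "expert"
  else if ["conversational", "working"].any (fun w => PySem.Str.isIn w text_lower) then "intermediate"
  else "intermediate"

-- ===== PORT B =====
def pvLevelTable : List (String × Nat) :=
  [("expert", 0), ("master", 0), ("guru", 0), ("architect", 0), ("lead", 0),
   ("advanced", 1), ("senior", 1), ("experienced", 1), ("professional", 1),
   ("intermediate", 2), ("moderate", 2), ("competent", 2), ("proficient", 2),
   ("beginner", 3), ("basic", 3), ("novice", 3), ("elementary", 3),
   ("native", 4), ("fluent", 4),
   ("conversational", 5), ("working", 5)]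

def pvLevelNames : List String := ["expert", "advanced", "intermediate", "beginner", "expert", "intermediate"]

def extract_level_from_text_alt (text : String) : String :=
  let text_lower := PySem.Str.lower text
  let ranks := pvLevelTable.filterMap (fun wr => if PySem.Str.isIn wr.1 text_lower then some wr.2 else none)
  match PySem.List.min? ranks (fun x => x) with
  | none => "intermediate"
  | some m => pvLevelNames.getD m "intermediate"

-- ===== PRECONDITION & SPEC =====
def Spec_extract_level_from_text (text : String) (out : String) : Prop := out = extract_level_from_text_alt text
instance (text : String) (out : String) : Decidable (Spec_extract_level_from_text text out) := by unfold Spec_extract_level_from_text; infer_instance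

-- ===== CLAIM (what is proved, stated in full; the proofs are below) =====
def Claim_equal_extract_level_from_text : Prop := ∀ (text : String), Dom_extract_level_from_text text → Spec_extract_level_from_text text (extract_level_from_text text)

-- ===== LEMMAS AND PROOFS =====

-- One cons step of B's rank-collecting filterMap, matched / unmatched keyword.
theorem pv_step_pos (p : String → Bool) (w : String) (r : Nat) (rest : List (String × Nat))
    (hp : p w = true) :
    ((w, r) :: rest).filterMap (fun wr => if p wr.1 then some wr.2 else none)
      = r :: rest.filterMap (fun wr => if p wr.1 then some wr.2 else none) := by
  simp [hp]

theorem pv_step_neg (p : String → Bool) (w : String) (r : Nat) (rest : List (String × Nat))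
    (hp : p w = false) :
    ((w, r) :: rest).filterMap (fun wr => if p wr.1 then some wr.2 else none)
      = rest.filterMap (fun wr => if p wr.1 then some wr.2 else none) := by
  simp [hp]

-- The running minimum over the remaining (rank-sorted) table never drops below the first match.
theorem pv_foldl_min_ranks (p : String → Bool) (tbl : List (String × Nat)) (k : Nat)
    (h : ∀ wr ∈ tbl, k ≤ wr.2) :
    (tbl.filterMap (fun wr => if p wr.1 then some wr.2 else none)).foldl min k = k := by
  induction tbl with
  | nil => rfl
  | cons a t ih =>
    have ha := h a (List.mem_cons_self ..)
    have ht : ∀ wr ∈ t, k ≤ wr.2 := fun wr hw => h wr (List.mem_cons_of_mem _ hw)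
    by_cases hp : p a.1 = true
    · simp [hp, Nat.min_eq_left ha, ih ht]
    · simp [hp, ih ht]

theorem pv_body_eq (tl : String) :
    (if ["expert", "master", "guru", "architect", "lead"].any (fun w => PySem.Str.isIn w tl) then "expert"
     else if ["advanced", "senior", "experienced", "professional"].any (fun w => PySem.Str.isIn w tl) then "advanced"
     else if ["intermediate", "moderate", "competent", "proficient"].any (fun w => PySem.Str.isIn w tl) then "intermediate"
     else if ["beginner", "basic", "novice", "elementary"].any (fun w => PySem.Str.isIn w tl) then "beginner"
     else if ["native", "fluent"].any (fun w => PySem.Str.isIn w tl) then "expert"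
     else if ["conversational", "working"].any (fun w => PySem.Str.isIn w tl) then "intermediate"
     else "intermediate")
    = (match PySem.List.min? (pvLevelTable.filterMap
          (fun wr => if PySem.Str.isIn wr.1 tl then some wr.2 else none)) (fun x => x) with
       | none => "intermediate"
       | some m => pvLevelNames.getD m "intermediate") := by
  unfold pvLevelTable
  by_cases h1 : PySem.Str.isIn "expert" tl = true
  · rw [pv_step_pos (p := fun w => PySem.Str.isIn w tl) _ _ _ h1, PySem.List.min?_id_cons,
        pv_foldl_min_ranks (p := fun w => PySem.Str.isIn w tl) _ _ (by decide)]
    simp only [List.any_cons, List.any_nil, h1]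
    simp [pvLevelNames]
  have h1f : PySem.Str.isIn "expert" tl = false := by simpa using h1
  rw [pv_step_neg (p := fun w => PySem.Str.isIn w tl) _ _ _ h1f]
  by_cases h2 : PySem.Str.isIn "master" tl = true
  · rw [pv_step_pos (p := fun w => PySem.Str.isIn w tl) _ _ _ h2, PySem.List.min?_id_cons,
        pv_foldl_min_ranks (p := fun w => PySem.Str.isIn w tl) _ _ (by decide)]
    simp only [List.any_cons, List.any_nil, h1f, h2]
    simp [pvLevelNames]
  have h2f : PySem.Str.isIn "master" tl = false := by simpa using h2
  rw [pv_step_neg (p := fun w => PySem.Str.isIn w tl) _ _ _ h2f]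
  by_cases h3 : PySem.Str.isIn "guru" tl = true
  · rw [pv_step_pos (p := fun w => PySem.Str.isIn w tl) _ _ _ h3, PySem.List.min?_id_cons,
        pv_foldl_min_ranks (p := fun w => PySem.Str.isIn w tl) _ _ (by decide)]
    simp only [List.any_cons, List.any_nil, h1f, h2f, h3]
    simp [pvLevelNames]
  have h3f : PySem.Str.isIn "guru" tl = false := by simpa using h3
  rw [pv_step_neg (p := fun w => PySem.Str.isIn w tl) _ _ _ h3f]
  by_cases h4 : PySem.Str.isIn "architect" tl = true
  · rw [pv_step_pos (p := fun w => PySem.Str.isIn w tl) _ _ _ h4, PySem.List.min?_id_cons,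
        pv_foldl_min_ranks (p := fun w => PySem.Str.isIn w tl) _ _ (by decide)]
    simp only [List.any_cons, List.any_nil, h1f, h2f, h3f, h4]
    simp [pvLevelNames]
  have h4f : PySem.Str.isIn "architect" tl = false := by simpa using h4
  rw [pv_step_neg (p := fun w => PySem.Str.isIn w tl) _ _ _ h4f]
  by_cases h5 : PySem.Str.isIn "lead" tl = true
  · rw [pv_step_pos (p := fun w => PySem.Str.isIn w tl) _ _ _ h5, PySem.List.min?_id_cons,
        pv_foldl_min_ranks (p := fun w => PySem.Str.isIn w tl) _ _ (by decide)]
    simp only [List.any_cons, List.any_nil, h1f, h2f, h3f, h4f, h5]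
    simp [pvLevelNames]
  have h5f : PySem.Str.isIn "lead" tl = false := by simpa using h5
  rw [pv_step_neg (p := fun w => PySem.Str.isIn w tl) _ _ _ h5f]
  by_cases h6 : PySem.Str.isIn "advanced" tl = true
  · rw [pv_step_pos (p := fun w => PySem.Str.isIn w tl) _ _ _ h6, PySem.List.min?_id_cons,
        pv_foldl_min_ranks (p := fun w => PySem.Str.isIn w tl) _ _ (by decide)]
    simp only [List.any_cons, List.any_nil, h1f, h2f, h3f, h4f, h5f, h6]
    simp [pvLevelNames]
  have h6f : PySem.Str.isIn "advanced" tl = false := by simpa using h6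
  rw [pv_step_neg (p := fun w => PySem.Str.isIn w tl) _ _ _ h6f]
  by_cases h7 : PySem.Str.isIn "senior" tl = true
  · rw [pv_step_pos (p := fun w => PySem.Str.isIn w tl) _ _ _ h7, PySem.List.min?_id_cons,
        pv_foldl_min_ranks (p := fun w => PySem.Str.isIn w tl) _ _ (by decide)]
    simp only [List.any_cons, List.any_nil, h1f, h2f, h3f, h4f, h5f, h6f, h7]
    simp [pvLevelNames]
  have h7f : PySem.Str.isIn "senior" tl = false := by simpa using h7
  rw [pv_step_neg (p := fun w => PySem.Str.isIn w tl) _ _ _ h7f]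
  by_cases h8 : PySem.Str.isIn "experienced" tl = true
  · rw [pv_step_pos (p := fun w => PySem.Str.isIn w tl) _ _ _ h8, PySem.List.min?_id_cons,
        pv_foldl_min_ranks (p := fun w => PySem.Str.isIn w tl) _ _ (by decide)]
    simp only [List.any_cons, List.any_nil, h1f, h2f, h3f, h4f, h5f, h6f, h7f, h8]
    simp [pvLevelNames]
  have h8f : PySem.Str.isIn "experienced" tl = false := by simpa using h8
  rw [pv_step_neg (p := fun w => PySem.Str.isIn w tl) _ _ _ h8f]
  by_cases h9 : PySem.Str.isIn "professional" tl = true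
  · rw [pv_step_pos (p := fun w => PySem.Str.isIn w tl) _ _ _ h9, PySem.List.min?_id_cons,
        pv_foldl_min_ranks (p := fun w => PySem.Str.isIn w tl) _ _ (by decide)]
    simp only [List.any_cons, List.any_nil, h1f, h2f, h3f, h4f, h5f, h6f, h7f, h8f, h9]
    simp [pvLevelNames]
  have h9f : PySem.Str.isIn "professional" tl = false := by simpa using h9
  rw [pv_step_neg (p := fun w => PySem.Str.isIn w tl) _ _ _ h9f]
  by_cases h10 : PySem.Str.isIn "intermediate" tl = true
  · rw [pv_step_pos (p := fun w => PySem.Str.isIn w tl) _ _ _ h10, PySem.List.min?_id_cons,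
        pv_foldl_min_ranks (p := fun w => PySem.Str.isIn w tl) _ _ (by decide)]
    simp only [List.any_cons, List.any_nil, h1f, h2f, h3f, h4f, h5f, h6f, h7f, h8f, h9f, h10]
    simp [pvLevelNames]
  have h10f : PySem.Str.isIn "intermediate" tl = false := by simpa using h10
  rw [pv_step_neg (p := fun w => PySem.Str.isIn w tl) _ _ _ h10f]
  by_cases h11 : PySem.Str.isIn "moderate" tl = true
  · rw [pv_step_pos (p := fun w => PySem.Str.isIn w tl) _ _ _ h11, PySem.List.min?_id_cons,
        pv_foldl_min_ranks (p := fun w => PySem.Str.isIn w tl) _ _ (by decide)]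
    simp only [List.any_cons, List.any_nil, h1f, h2f, h3f, h4f, h5f, h6f, h7f, h8f, h9f, h10f, h11]
    simp [pvLevelNames]
  have h11f : PySem.Str.isIn "moderate" tl = false := by simpa using h11
  rw [pv_step_neg (p := fun w => PySem.Str.isIn w tl) _ _ _ h11f]
  by_cases h12 : PySem.Str.isIn "competent" tl = true
  · rw [pv_step_pos (p := fun w => PySem.Str.isIn w tl) _ _ _ h12, PySem.List.min?_id_cons,
        pv_foldl_min_ranks (p := fun w => PySem.Str.isIn w tl) _ _ (by decide)]
    simp only [List.any_cons, List.any_nil, h1f, h2f, h3f, h4f, h5f, h6f, h7f, h8f, h9f, h10f, h11f, h12]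
    simp [pvLevelNames]
  have h12f : PySem.Str.isIn "competent" tl = false := by simpa using h12
  rw [pv_step_neg (p := fun w => PySem.Str.isIn w tl) _ _ _ h12f]
  by_cases h13 : PySem.Str.isIn "proficient" tl = true
  · rw [pv_step_pos (p := fun w => PySem.Str.isIn w tl) _ _ _ h13, PySem.List.min?_id_cons,
        pv_foldl_min_ranks (p := fun w => PySem.Str.isIn w tl) _ _ (by decide)]
    simp only [List.any_cons, List.any_nil, h1f, h2f, h3f, h4f, h5f, h6f, h7f, h8f, h9f, h10f, h11f, h12f, h13]
    simp [pvLevelNames]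
  have h13f : PySem.Str.isIn "proficient" tl = false := by simpa using h13
  rw [pv_step_neg (p := fun w => PySem.Str.isIn w tl) _ _ _ h13f]
  by_cases h14 : PySem.Str.isIn "beginner" tl = true
  · rw [pv_step_pos (p := fun w => PySem.Str.isIn w tl) _ _ _ h14, PySem.List.min?_id_cons,
        pv_foldl_min_ranks (p := fun w => PySem.Str.isIn w tl) _ _ (by decide)]
    simp only [List.any_cons, List.any_nil, h1f, h2f, h3f, h4f, h5f, h6f, h7f, h8f, h9f, h10f, h11f, h12f, h13f, h14]
    simp [pvLevelNames]
  have h14f : PySem.Str.isIn "beginner" tl = false := by simpa using h14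
  rw [pv_step_neg (p := fun w => PySem.Str.isIn w tl) _ _ _ h14f]
  by_cases h15 : PySem.Str.isIn "basic" tl = true
  · rw [pv_step_pos (p := fun w => PySem.Str.isIn w tl) _ _ _ h15, PySem.List.min?_id_cons,
        pv_foldl_min_ranks (p := fun w => PySem.Str.isIn w tl) _ _ (by decide)]
    simp only [List.any_cons, List.any_nil, h1f, h2f, h3f, h4f, h5f, h6f, h7f, h8f, h9f, h10f, h11f, h12f, h13f, h14f, h15]
    simp [pvLevelNames]
  have h15f : PySem.Str.isIn "basic" tl = false := by simpa using h15
  rw [pv_step_neg (p := fun w => PySem.Str.isIn w tl) _ _ _ h15f]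
  by_cases h16 : PySem.Str.isIn "novice" tl = true
  · rw [pv_step_pos (p := fun w => PySem.Str.isIn w tl) _ _ _ h16, PySem.List.min?_id_cons,
        pv_foldl_min_ranks (p := fun w => PySem.Str.isIn w tl) _ _ (by decide)]
    simp only [List.any_cons, List.any_nil, h1f, h2f, h3f, h4f, h5f, h6f, h7f, h8f, h9f, h10f, h11f, h12f, h13f, h14f, h15f, h16]
    simp [pvLevelNames]
  have h16f : PySem.Str.isIn "novice" tl = false := by simpa using h16
  rw [pv_step_neg (p := fun w => PySem.Str.isIn w tl) _ _ _ h16f]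
  by_cases h17 : PySem.Str.isIn "elementary" tl = true
  · rw [pv_step_pos (p := fun w => PySem.Str.isIn w tl) _ _ _ h17, PySem.List.min?_id_cons,
        pv_foldl_min_ranks (p := fun w => PySem.Str.isIn w tl) _ _ (by decide)]
    simp only [List.any_cons, List.any_nil, h1f, h2f, h3f, h4f, h5f, h6f, h7f, h8f, h9f, h10f, h11f, h12f, h13f, h14f, h15f, h16f, h17]
    simp [pvLevelNames]
  have h17f : PySem.Str.isIn "elementary" tl = false := by simpa using h17
  rw [pv_step_neg (p := fun w => PySem.Str.isIn w tl) _ _ _ h17f]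
  by_cases h18 : PySem.Str.isIn "native" tl = true
  · rw [pv_step_pos (p := fun w => PySem.Str.isIn w tl) _ _ _ h18, PySem.List.min?_id_cons,
        pv_foldl_min_ranks (p := fun w => PySem.Str.isIn w tl) _ _ (by decide)]
    simp only [List.any_cons, List.any_nil, h1f, h2f, h3f, h4f, h5f, h6f, h7f, h8f, h9f, h10f, h11f, h12f, h13f, h14f, h15f, h16f, h17f, h18]
    simp [pvLevelNames]
  have h18f : PySem.Str.isIn "native" tl = false := by simpa using h18
  rw [pv_step_neg (p := fun w => PySem.Str.isIn w tl) _ _ _ h18f]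
  by_cases h19 : PySem.Str.isIn "fluent" tl = true
  · rw [pv_step_pos (p := fun w => PySem.Str.isIn w tl) _ _ _ h19, PySem.List.min?_id_cons,
        pv_foldl_min_ranks (p := fun w => PySem.Str.isIn w tl) _ _ (by decide)]
    simp only [List.any_cons, List.any_nil, h1f, h2f, h3f, h4f, h5f, h6f, h7f, h8f, h9f, h10f, h11f, h12f, h13f, h14f, h15f, h16f, h17f, h18f, h19]
    simp [pvLevelNames]
  have h19f : PySem.Str.isIn "fluent" tl = false := by simpa using h19
  rw [pv_step_neg (p := fun w => PySem.Str.isIn w tl) _ _ _ h19f]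
  by_cases h20 : PySem.Str.isIn "conversational" tl = true
  · rw [pv_step_pos (p := fun w => PySem.Str.isIn w tl) _ _ _ h20, PySem.List.min?_id_cons,
        pv_foldl_min_ranks (p := fun w => PySem.Str.isIn w tl) _ _ (by decide)]
    simp only [List.any_cons, List.any_nil, h1f, h2f, h3f, h4f, h5f, h6f, h7f, h8f, h9f, h10f, h11f, h12f, h13f, h14f, h15f, h16f, h17f, h18f, h19f, h20]
    simp [pvLevelNames]
  have h20f : PySem.Str.isIn "conversational" tl = false := by simpa using h20
  rw [pv_step_neg (p := fun w => PySem.Str.isIn w tl) _ _ _ h20f]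
  by_cases h21 : PySem.Str.isIn "working" tl = true
  · rw [pv_step_pos (p := fun w => PySem.Str.isIn w tl) _ _ _ h21, PySem.List.min?_id_cons,
        pv_foldl_min_ranks (p := fun w => PySem.Str.isIn w tl) _ _ (by decide)]
    simp only [List.any_cons, List.any_nil, h1f, h2f, h3f, h4f, h5f, h6f, h7f, h8f, h9f, h10f, h11f, h12f, h13f, h14f, h15f, h16f, h17f, h18f, h19f, h20f, h21]
    simp [pvLevelNames]
  have h21f : PySem.Str.isIn "working" tl = false := by simpa using h21
  rw [pv_step_neg (p := fun w => PySem.Str.isIn w tl) _ _ _ h21f]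
  simp only [List.any_cons, List.any_nil, h1f, h2f, h3f, h4f, h5f, h6f, h7f, h8f, h9f, h10f, h11f, h12f, h13f, h14f, h15f, h16f, h17f, h18f, h19f, h20f, h21f]
  simp [List.filterMap_nil, PySem.List.min?]

-- ===== VERDICT (by name: the statement is the Claim_ definition above) =====
theorem extract_level_from_text_spec : Claim_equal_extract_level_from_text := by
  intro text _
  unfold Spec_extract_level_from_text extract_level_from_text extract_level_from_text_alt
  exact pv_body_eq (PySem.Str.lower text)
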